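-- pv_equiv track=rewrite | github.com/Ranbeer84/LUMEO | backend/services/query_service.py | _filter_interesting_objects
-- ===== SOURCE A (Python) =====
-- from typing import Dict, List, Optional
--
-- def _filter_interesting_objects(objects: List[str]) -> List[str]:
--     """
--     Filter to most interesting/meaningful objects
--
--     Skip generic objects like 'person', focus on contextual items
--     """
--     # Skip these common/generic objects
--     skip_objects = {'person', 'man', 'woman', 'child', 'people'}
--
--     # Prioritize these interesting categories
--     priority_objects = {
--         'cake', 'pizza', 'wine', 'food', 'dining',  # Food/dining
--         'car', 'motorcycle', 'bicycle', 'bus', 'train',  # Vehicles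
--         'laptop', 'phone', 'tv', 'keyboard',  # Electronics
--         'umbrella', 'backpack', 'suitcase',  # Items
--         'dog', 'cat', 'bird', 'horse',  # Animals
--         'couch', 'chair', 'table', 'bed'  # Furniture
--     }
--
--     interesting = []
--     for obj in objects:
--         obj_lower = obj.lower()
--         if obj_lower not in skip_objects:
--             interesting.append(obj)
--
--     # Sort by priority
--     interesting.sort(key=lambda x: 0 if x.lower() in priority_objects else 1)
--
--     return interesting
-- ===== SOURCE B (Python) =====
-- from typing import Dict, List, Optional
--
-- # Module-level constants built once from word strings.
-- _SKIP = frozenset("person man woman child people".split())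
-- _PRIORITY = frozenset(
--     "cake pizza wine food dining "
--     "car motorcycle bicycle bus train "
--     "laptop phone tv keyboard "
--     "umbrella backpack suitcase "
--     "dog cat bird horse "
--     "couch chair table bed".split()
-- )
--
-- def _filter_interesting_objects(objects: List[str]) -> List[str]:
--     """Staged comprehensions: keep non-skipped, then priority ones first, rest after (no sort)."""
--     keep = [o for o in objects if o.lower() not in _SKIP]
--     return [o for o in keep if o.lower() in _PRIORITY] + \
--            [o for o in keep if o.lower() not in _PRIORITY]
-- ===== Notes on version B (the rewrite author's own statement) =====
-- stated objective: alternative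
-- what changed: Replaces filter-then-stable-sort-by-0/1-key with three filter comprehensions (keep non-skipped; priority ones first, the rest after) over frozenset constants built from split word strings, eliminating the sort; it trades one sort pass for two extra filter passes.
import Mathlib
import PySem

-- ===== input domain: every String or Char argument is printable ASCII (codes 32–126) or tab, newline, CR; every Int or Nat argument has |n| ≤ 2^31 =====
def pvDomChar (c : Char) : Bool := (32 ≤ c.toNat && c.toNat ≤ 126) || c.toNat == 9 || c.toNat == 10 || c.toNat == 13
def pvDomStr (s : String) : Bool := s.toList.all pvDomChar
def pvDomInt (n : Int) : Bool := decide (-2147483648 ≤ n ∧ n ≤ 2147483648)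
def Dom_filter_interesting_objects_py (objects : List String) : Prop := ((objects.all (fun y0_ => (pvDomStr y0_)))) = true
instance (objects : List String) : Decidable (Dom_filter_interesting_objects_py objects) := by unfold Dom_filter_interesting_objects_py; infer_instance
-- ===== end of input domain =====

set_option maxRecDepth 4000


-- ===== PORT A =====
-- B drops A's stable sort: three filter passes put priority objects first (no sort, same result).

-- A's skip set (Python set literal; membership only, so a list suffices)
def pvSkipA : List String := ["person", "man", "woman", "child", "people"]
-- A's priority set
def pvPrioA : List String :=
  ["cake", "pizza", "wine", "food", "dining",
   "car", "motorcycle", "bicycle", "bus", "train",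
   "laptop", "phone", "tv", "keyboard",
   "umbrella", "backpack", "suitcase",
   "dog", "cat", "bird", "horse",
   "couch", "chair", "table", "bed"]

def filter_interesting_objects_py (objects : List String) : List String :=
  -- for obj in objects: if obj.lower() not in skip_objects: interesting.append(obj)
  let interesting := objects.foldl
    (fun acc obj => if (PySem.Str.lower obj) ∈ pvSkipA then acc else acc ++ [obj]) []
  -- interesting.sort(key=lambda x: 0 if x.lower() in priority_objects else 1)  (stable)
  PySem.List.sorted interesting
    (fun x => if (PySem.Str.lower x) ∈ pvPrioA then (0 : Int) else 1) false

-- ===== PORT B =====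
-- _SKIP = frozenset("person man woman child people".split())
def pvSkipB : PySem.Set String :=
  PySem.Set.ofList (PySem.Str.split₀ "person man woman child people")
-- _PRIORITY = frozenset("cake pizza … bed".split())
def pvPrioB : PySem.Set String :=
  PySem.Set.ofList (PySem.Str.split₀
    ("cake pizza wine food dining " ++
     "car motorcycle bicycle bus train " ++
     "laptop phone tv keyboard " ++
     "umbrella backpack suitcase " ++
     "dog cat bird horse " ++
     "couch chair table bed"))

def filter_interesting_objects_py_alt (objects : List String) : List String :=
  -- keep = [o for o in objects if o.lower() not in _SKIP]
  let keep := objects.filter (fun o => !(PySem.Set.contains pvSkipB (PySem.Str.lower o)))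
  -- [o for o in keep if o.lower() in _PRIORITY] + [o for o in keep if o.lower() not in _PRIORITY]
  keep.filter (fun o => PySem.Set.contains pvPrioB (PySem.Str.lower o))
    ++ keep.filter (fun o => !(PySem.Set.contains pvPrioB (PySem.Str.lower o)))

-- ===== PRECONDITION & SPEC =====
def Spec_filter_interesting_objects_py (objects : List String) (out : List String) : Prop := out = filter_interesting_objects_py_alt objects
instance (objects : List String) (out : List String) : Decidable (Spec_filter_interesting_objects_py objects out) := by unfold Spec_filter_interesting_objects_py; infer_instance

-- ===== CLAIM (what is proved, stated in full; the proofs are below) =====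
def Claim_equal_filter_interesting_objects_py : Prop := ∀ (objects : List String), Dom_filter_interesting_objects_py objects → Spec_filter_interesting_objects_py objects (filter_interesting_objects_py objects)

-- ===== LEMMAS AND PROOFS =====

-- proof-only abbreviations for the two tests
def pvP (x : String) : Bool := decide (PySem.Str.lower x ∈ pvPrioA)
def pvNS (x : String) : Bool := decide (PySem.Str.lower x ∉ pvSkipA)
def pvKey (x : String) : Int := if PySem.Str.lower x ∈ pvPrioA then (0 : Int) else 1
def pvBefore (a b : String) : Bool := decide (pvKey a < pvKey b)

theorem pvBefore_false_of_P {a b : String} (ha : pvP a = true) (hb : pvP b = true) :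
    pvBefore a b = false := by
  simp [pvBefore, pvKey, pvP] at *
  simp [ha, hb]

theorem pvBefore_true_of_P_notP {a b : String} (ha : pvP a = true) (hb : pvP b = false) :
    pvBefore a b = true := by
  simp [pvBefore, pvKey, pvP] at *
  simp [ha, hb]

theorem pvBefore_false_of_notP {a b : String} (ha : pvP a = false) :
    pvBefore a b = false := by
  simp [pvBefore, pvKey, pvP] at *
  simp [ha]
  split <;> omega

-- inserting x before the first element failing A-part membership lands between A and B
theorem pvInsertBy_mid (x : String) (A : List String) (b : String) (B : List String)
    (hA : ∀ a ∈ A, pvBefore x a = false) (hb : pvBefore x b = true) :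
    PySem.List.insertBy pvBefore x (A ++ b :: B) = A ++ x :: b :: B := by
  induction A with
  | nil => simp [PySem.List.insertBy, hb]
  | cons a A ih =>
    have hxa := hA a (by simp)
    simp only [List.cons_append, PySem.List.insertBy, hxa]
    simp [ih (fun a ha => hA a (by simp [ha]))]

-- the insertion-sort fold over a 0/1 key is a stable partition
theorem pvFold_insertBy_partition (xs : List String) (A B : List String)
    (hA : ∀ a ∈ A, pvP a = true) (hB : ∀ b ∈ B, pvP b = false) :
    xs.foldl (fun acc x => PySem.List.insertBy pvBefore x acc) (A ++ B)
      = (A ++ xs.filter pvP) ++ (B ++ xs.filter (fun x => !pvP x)) := by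
  induction xs generalizing A B with
  | nil => simp
  | cons x xs ih =>
    simp only [List.foldl_cons]
    by_cases hx : pvP x = true
    · have hins : PySem.List.insertBy pvBefore x (A ++ B) = (A ++ [x]) ++ B := by
        cases B with
        | nil =>
          have h := PySem.List.insertBy_of_forall_not_before pvBefore x A
            (fun y hy => pvBefore_false_of_P hx (hA y hy))
          simpa using h
        | cons b B =>
          rw [pvInsertBy_mid x A b B
            (fun a ha => pvBefore_false_of_P hx (hA a ha))
            (pvBefore_true_of_P_notP hx (hB b (by simp)))]
          simp
      rw [hins, ih (A ++ [x]) B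
        (by intro a ha; rcases List.mem_append.1 ha with h | h
            · exact hA a h
            · simp at h; subst h; exact hx) hB]
      simp [hx]
    · have hx' : pvP x = false := by simpa using hx
      have hins : PySem.List.insertBy pvBefore x (A ++ B) = A ++ (B ++ [x]) := by
        rw [PySem.List.insertBy_of_forall_not_before pvBefore x (A ++ B)
          (fun y _ => pvBefore_false_of_notP hx')]
        simp
      rw [hins, ih A (B ++ [x]) hA
        (by intro b hb; rcases List.mem_append.1 hb with h | h
            · exact hB b h
            · simp at h; subst h; exact hx')]
      simp [hx']

-- A: the append loop is a filter, then the sort is the partition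
theorem pvA_eq (objects : List String) :
    filter_interesting_objects_py objects
      = (objects.filter pvNS).filter pvP
        ++ (objects.filter pvNS).filter (fun x => !pvP x) := by
  unfold filter_interesting_objects_py
  have hloop : objects.foldl
      (fun acc obj => if (PySem.Str.lower obj) ∈ pvSkipA then acc else acc ++ [obj]) []
      = objects.filter pvNS := by
    have := PySem.List.foldl_append_if pvNS (fun x => x) objects []
    simp only [List.map_id', List.nil_append] at this
    rw [← this]
    apply PySem.List.foldl_congr_mem
    intro acc obj _
    by_cases h : PySem.Str.lower obj ∈ pvSkipA <;> simp [pvNS, h]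
  rw [hloop, PySem.List.sorted_eq_foldl_insertBy]
  have := pvFold_insertBy_partition (objects.filter pvNS) [] []
    (by simp) (by simp)
  simp only [List.nil_append, List.append_nil] at this
  have hbefore : (fun (a b : String) =>
      decide ((if PySem.Str.lower a ∈ pvPrioA then (0:Int) else 1)
            < (if PySem.Str.lower b ∈ pvPrioA then (0:Int) else 1))) = pvBefore := by
    funext a b; simp [pvBefore, pvKey]
  rw [hbefore, this]

-- B's split-built sets are the same element lists as A's literals
theorem pvSkipB_eq : pvSkipB = pvSkipA := by decide
theorem pvPrioB_eq : pvPrioB = pvPrioA := by decide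

-- B's membership tests agree with the proof predicates
theorem pvB_skip_test (o : String) :
    (!(PySem.Set.contains pvSkipB (PySem.Str.lower o))) = pvNS o := by
  simp [PySem.Set.contains, pvSkipB_eq, pvNS]

theorem pvB_prio_test (o : String) :
    PySem.Set.contains pvPrioB (PySem.Str.lower o) = pvP o := by
  simp [PySem.Set.contains, pvPrioB_eq, pvP]

theorem pvB_eq (objects : List String) :
    filter_interesting_objects_py_alt objects
      = (objects.filter pvNS).filter pvP
        ++ (objects.filter pvNS).filter (fun x => !pvP x) := by
  unfold filter_interesting_objects_py_alt
  simp only [pvB_skip_test, pvB_prio_test]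

-- ===== VERDICT (by name: the statement is the Claim_ definition above) =====
theorem filter_interesting_objects_py_spec : Claim_equal_filter_interesting_objects_py := by
  intro objects _
  unfold Spec_filter_interesting_objects_py
  rw [pvA_eq, pvB_eq]
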